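-- pv_equiv track=rewrite | github.com/coder109/Hexo2Typecho | hexo2typecho.py | escape_math_underscores
-- ===== SOURCE A (Python) =====
-- def is_escaped_at(text: str, index: int) -> bool:
--     backslashes = 0
--     pos = index - 1
--     while pos >= 0 and text[pos] == "\\":
--         backslashes += 1
--         pos -= 1
--     return (backslashes % 2) == 1
--
-- def escape_math_underscores(text: str) -> str:
--     out: list[str] = []
--     for idx, ch in enumerate(text):
--         if ch == "_" and not is_escaped_at(text, idx):
--             out.append("\\_")
--         else:
--             out.append(ch)
--     return "".join(out)
-- ===== SOURCE B (Python) =====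
-- def escape_math_underscores(text: str) -> str:
--     # Single pass: track the length of the current run of consecutive backslashes;
--     # an underscore is escaped iff that run has odd length.
--     out = []
--     run = 0
--     for ch in text:
--         if ch == "_" and run % 2 == 0:
--             out.append("\\_")
--         else:
--             out.append(ch)
--         run = run + 1 if ch == "\\" else 0
--     return "".join(out)
-- ===== Notes on version B (the rewrite author's own statement) =====
-- stated objective: alternative
-- what changed: Replaced the per-underscore backward backslash scan with a single forward pass that carries the current backslash-run length and decides escape parity in O(1) per character.
import Mathlib
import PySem

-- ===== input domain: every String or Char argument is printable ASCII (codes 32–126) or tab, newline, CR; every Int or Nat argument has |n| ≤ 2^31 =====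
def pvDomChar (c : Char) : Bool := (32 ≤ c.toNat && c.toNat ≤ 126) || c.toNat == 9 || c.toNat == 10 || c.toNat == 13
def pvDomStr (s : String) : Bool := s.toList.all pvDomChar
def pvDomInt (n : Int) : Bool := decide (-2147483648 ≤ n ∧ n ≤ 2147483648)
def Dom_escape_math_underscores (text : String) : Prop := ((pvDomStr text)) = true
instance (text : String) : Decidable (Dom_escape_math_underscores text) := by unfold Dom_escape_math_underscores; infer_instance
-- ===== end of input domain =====

-- B replaces A's per-underscore backward backslash scan by one forward pass that
-- carries the current backslash-run length (alternative algorithm; same measured cost).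


-- ===== PORT A =====
-- while pos >= 0 and text[pos] == "\\": backslashes += 1; pos -= 1
-- ported as structural recursion on the prefix length n (= index): count the
-- consecutive backslashes ending at position n-1, stopping at the first non-backslash.
def bsBefore (cs : List Char) : Nat → Nat
  | 0 => 0
  | n + 1 => if cs.getD n ' ' = '\\' then bsBefore cs n + 1 else 0

-- is_escaped_at(text, index); index comes from enumerate so 0 ≤ index, and .toNat is exact there
def is_escaped_at (cs : List Char) (index : Int) : Bool := bsBefore cs index.toNat % 2 == 1

def escape_math_underscores (text : String) : String :=
  let cs := text.toList
  String.ofList ((PySem.List.enumerate cs 0).foldl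
    (fun out p => if p.2 = '_' ∧ is_escaped_at cs p.1 = false then out ++ ['\\', '_'] else out ++ [p.2]) [])

-- ===== PORT B =====
-- single pass carrying run = length of the current consecutive-backslash run
def altGo : List Char → Nat → List Char
  | [], _ => []
  | c :: rest, run =>
      (if c = '_' ∧ run % 2 = 0 then ['\\', '_'] else [c]) ++
        altGo rest (if c = '\\' then run + 1 else 0)

def escape_math_underscores_alt (text : String) : String :=
  String.ofList (altGo text.toList 0)

-- ===== PRECONDITION & SPEC =====
def Spec_escape_math_underscores (text : String) (out : String) : Prop := out = escape_math_underscores_alt text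
instance (text : String) (out : String) : Decidable (Spec_escape_math_underscores text out) := by unfold Spec_escape_math_underscores; infer_instance

-- ===== CLAIM (what is proved, stated in full; the proofs are below) =====
def Claim_equal_escape_math_underscores : Prop := ∀ (text : String), Dom_escape_math_underscores text → Spec_escape_math_underscores text (escape_math_underscores text)

-- ===== LEMMAS AND PROOFS =====
def emitA (cs : List Char) (p : Int × Char) : List Char :=
  if p.2 = '_' ∧ is_escaped_at cs p.1 = false then ['\\', '_'] else [p.2]

lemma key (suf : List Char) : ∀ (cs : List Char) (i : Nat), cs.drop i = suf →
    (PySem.List.enumerate suf (i : Int)).flatMap (emitA cs) = altGo suf (bsBefore cs i) := by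
  induction suf with
  | nil => intro cs i _; simp [PySem.List.enumerate_nil, altGo]
  | cons c rest ih =>
    intro cs i hdrop
    have hi : i < cs.length := by
      by_contra h
      simp [List.drop_eq_nil_of_le (Nat.le_of_not_lt h)] at hdrop
    have hget : cs[i]? = some c := by
      have h0 := (List.getElem?_drop (xs := cs) (i := i) (j := 0)).symm
      simpa [hdrop] using h0
    have hdrop' : cs.drop (i + 1) = rest := by
      rw [← List.drop_drop, hdrop]
      rfl
    rw [PySem.List.enumerate_cons, List.flatMap_cons]
    have hesc : is_escaped_at cs (i : Int) = (bsBefore cs i % 2 == 1) := by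
      simp [is_escaped_at]
    have hnext : bsBefore cs (i + 1) = (if c = '\\' then bsBefore cs i + 1 else 0) := by
      simp [bsBefore, List.getD, hget]
    have hrec := ih cs (i + 1) hdrop'
    have harg : ((i : Int) + 1) = ((i + 1 : Nat) : Int) := by push_cast; ring
    rw [harg] at *
    show emitA cs (i, c) ++ _ = altGo (c :: rest) (bsBefore cs i)
    rw [altGo, hrec, hnext]
    congr 1
    simp only [emitA, hesc]
    by_cases hc : c = '_'
    · by_cases hp : bsBefore cs i % 2 = 0
      · simp [hc, hp]
      · have h1 : bsBefore cs i % 2 = 1 := by omega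
        simp [hc, h1]
    · simp [hc]

lemma foldl_eq (cs : List Char) :
    (PySem.List.enumerate cs 0).foldl
      (fun out p => if p.2 = '_' ∧ is_escaped_at cs p.1 = false then out ++ ['\\', '_'] else out ++ [p.2]) []
      = altGo cs 0 := by
  have hcong : ∀ (init : List Char), (PySem.List.enumerate cs 0).foldl
      (fun out p => if p.2 = '_' ∧ is_escaped_at cs p.1 = false then out ++ ['\\', '_'] else out ++ [p.2]) init
      = (PySem.List.enumerate cs 0).foldl (fun out p => out ++ emitA cs p) init := by
    intro init
    apply PySem.List.foldl_congr_mem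
    intro acc p _
    simp only [emitA]
    split <;> rfl
  rw [hcong, PySem.List.foldl_append_eq_flatMap]
  have h0 : bsBefore cs 0 = 0 := rfl
  simpa [h0] using key cs cs 0 rfl

-- ===== VERDICT (by name: the statement is the Claim_ definition above) =====
theorem escape_math_underscores_spec : Claim_equal_escape_math_underscores := by
  intro text _
  unfold Spec_escape_math_underscores escape_math_underscores escape_math_underscores_alt
  simp only []
  rw [foldl_eq]
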